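-- pv_equiv track=rewrite | github.com/Tomastoons/real_brands | app/extract.py | _collapse_component_brands
-- ===== SOURCE A (Python) =====
-- def _collapse_component_brands(text: str, brands: list[str]) -> list[str]:
--     """Remove single-token brands that are components of accepted multi-word brands."""
--     multiword_brands = [brand for brand in brands if " " in brand]
--     if not multiword_brands:
--         return brands
--
--     drop_candidates: set[str] = set()
--     for multiword in multiword_brands:
--         multiword_tokens = multiword.split()
--         for token in multiword.split():
--             if token in brands and " " not in token:
--                 drop_candidates.add(token)
--
--         # Drop shorter contiguous multiword fragments of longer accepted brands.
--         for other in multiword_brands: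
--             if other == multiword:
--                 continue
--             other_tokens = other.split()
--             if len(other_tokens) >= len(multiword_tokens):
--                 continue
--             for idx in range(0, len(multiword_tokens) - len(other_tokens) + 1):
--                 if multiword_tokens[idx: idx + len(other_tokens)] == other_tokens:
--                     drop_candidates.add(other)
--                     break
--
--     return [brand for brand in brands if brand not in drop_candidates]
-- ===== SOURCE B (Python) =====
-- def _collapse_component_brands(text: str, brands: list[str]) -> list[str]:
--     """Remove single-token brands that are components of accepted multi-word brands."""
--     tokens: set[str] = set()
--     frags: set[tuple] = set()
--     for brand in brands:
--         if " " in brand: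
--             toks = brand.split()
--             tokens.update(toks)
--             n = len(toks)
--             for length in range(0, n):
--                 for i in range(n - length + 1):
--                     frags.add(tuple(toks[i:i + length]))
--     return [
--         b for b in brands
--         if not ((" " not in b and b in tokens)
--                 or (" " in b and tuple(b.split()) in frags))
--     ]
-- ===== Notes on version B (the rewrite author's own statement) =====
-- stated objective: alternative
-- what changed: Replaces A's nested pairwise comparison of every multiword brand against every other (sliding a window for each pair) by a single indexing pass that collects all tokens and all proper contiguous token-slices of the space-containing brands into sets, followed by one membership filter over brands.
import Mathlib
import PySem

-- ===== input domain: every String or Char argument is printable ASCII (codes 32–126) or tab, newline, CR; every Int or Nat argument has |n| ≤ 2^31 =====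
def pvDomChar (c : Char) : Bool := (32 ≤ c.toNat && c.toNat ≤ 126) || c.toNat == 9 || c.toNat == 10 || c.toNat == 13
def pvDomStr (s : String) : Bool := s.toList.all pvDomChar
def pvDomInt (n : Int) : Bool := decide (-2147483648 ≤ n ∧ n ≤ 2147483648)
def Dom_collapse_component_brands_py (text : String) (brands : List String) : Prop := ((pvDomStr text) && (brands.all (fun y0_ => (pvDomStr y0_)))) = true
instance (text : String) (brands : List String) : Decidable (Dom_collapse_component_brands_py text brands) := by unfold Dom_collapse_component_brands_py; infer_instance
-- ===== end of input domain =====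

-- B replaces A's nested pairwise slice comparison by one pass that indexes every proper
-- token-slice of the space-containing brands, followed by a single membership filter.

-- ===== PORT A =====
-- inner 'for idx in range(...): if multiword_tokens[idx:idx+len(other_tokens)] == other_tokens: add; break'
def fragScanA (mts ots : List String) : Bool :=
  (PySem.List.pyRange 0 ((mts.length : Int) - (ots.length : Int) + 1) 1).any
    (fun idx => PySem.List.slice mts (some idx) (some (idx + (ots.length : Int))) == ots)

def collapse_component_brands_py (text : String) (brands : List String) : List String :=
  let multiword_brands := brands.filter (fun brand => PySem.Str.isIn " " brand)
  if multiword_brands.isEmpty then brands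
  else
    let drop_candidates : PySem.Set String :=
      multiword_brands.foldl (fun s multiword =>
        let multiword_tokens := PySem.Str.split₀ multiword
        let s := (PySem.Str.split₀ multiword).foldl (fun s token =>
          if brands.contains token && !(PySem.Str.isIn " " token)
          then PySem.Set.add s token else s) s
        multiword_brands.foldl (fun s other =>
          if other == multiword then s
          else
            let other_tokens := PySem.Str.split₀ other
            if other_tokens.length ≥ multiword_tokens.length then s
            else if fragScanA multiword_tokens other_tokens
                 then PySem.Set.add s other else s) s)
        PySem.Set.empty
    brands.filter (fun brand => !(PySem.Set.contains drop_candidates brand))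

-- ===== PORT B =====
def collapse_component_brands_py_alt (text : String) (brands : List String) : List String :=
  let st := brands.foldl
    (fun (p : PySem.Set String × PySem.Set (List String)) brand =>
      if PySem.Str.isIn " " brand then
        let toks := PySem.Str.split₀ brand
        let tokens := PySem.Set.update p.1 toks
        let n := toks.length
        let frags := (PySem.List.pyRange 0 (n : Int) 1).foldl (fun f length =>
          (PySem.List.pyRange 0 ((n : Int) - length + 1) 1).foldl (fun f i =>
            PySem.Set.add f (PySem.List.slice toks (some i) (some (i + length)))) f) p.2
        (tokens, frags)
      else p)
    (PySem.Set.empty, PySem.Set.empty)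
  brands.filter (fun b =>
    !((!(PySem.Str.isIn " " b) && PySem.Set.contains st.1 b)
      || (PySem.Str.isIn " " b && PySem.Set.contains st.2 (PySem.Str.split₀ b))))

-- ===== PRECONDITION & SPEC =====
def Spec_collapse_component_brands_py (text : String) (brands : List String) (out : List String) : Prop := out = collapse_component_brands_py_alt text brands
instance (text : String) (brands : List String) (out : List String) : Decidable (Spec_collapse_component_brands_py text brands out) := by unfold Spec_collapse_component_brands_py; infer_instance

-- ===== CLAIM (what is proved, stated in full; the proofs are below) =====
def Claim_equal_collapse_component_brands_py : Prop := ∀ (text : String) (brands : List String), Dom_collapse_component_brands_py text brands → Spec_collapse_component_brands_py text brands (collapse_component_brands_py text brands)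

-- ===== LEMMAS AND PROOFS =====

-- generic membership through a set-accumulating foldl
lemma mem_foldl_iff {α β : Type} (f : List α → β → List α) (Q : β → α → Prop)
    (hf : ∀ s b x, x ∈ f s b ↔ x ∈ s ∨ Q b x) (l : List β) (s : List α) (x : α) :
    x ∈ l.foldl f s ↔ x ∈ s ∨ ∃ b ∈ l, Q b x := by
  induction l generalizing s with
  | nil => simp
  | cons hd t ih =>
    simp only [List.foldl_cons, ih, hf, List.mem_cons]
    constructor
    · rintro ((h | h) | ⟨b, hb, hq⟩)
      exacts [Or.inl h, Or.inr ⟨hd, Or.inl rfl, h⟩, Or.inr ⟨b, Or.inr hb, hq⟩]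
    · rintro (h | ⟨b, (rfl | hb), hq⟩)
      exacts [Or.inl (Or.inl h), Or.inl (Or.inr hq), Or.inr ⟨b, hb, hq⟩]

lemma foldl_id_of_mem {α β : Type} (f : α → β → α) (l : List β) (s : α)
    (h : ∀ b ∈ l, ∀ a, f a b = a) : l.foldl f s = s := by
  induction l generalizing s with
  | nil => rfl
  | cons hd t ih =>
    simp only [List.foldl_cons, h hd (by simp)]
    exact ih _ (fun b hb a => h b (by simp [hb]) a)

-- the condition under which A's drop set contains x (to be proved)
def dropCondA (brands : List String) (x : String) : Prop :=
  ∃ M ∈ brands.filter (fun b => PySem.Str.isIn " " b),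
    (∃ t ∈ PySem.Str.split₀ M,
        (brands.contains t && !(PySem.Str.isIn " " t)) = true ∧ x = t)
    ∨ (∃ O ∈ brands.filter (fun b => PySem.Str.isIn " " b),
        ((O == M) = false
          ∧ ¬ (PySem.Str.split₀ O).length ≥ (PySem.Str.split₀ M).length
          ∧ fragScanA (PySem.Str.split₀ M) (PySem.Str.split₀ O) = true)
          ∧ x = O)

lemma memA (brands : List String) (x : String) :
    x ∈ (brands.filter (fun b => PySem.Str.isIn " " b)).foldl (fun s multiword =>
        let multiword_tokens := PySem.Str.split₀ multiword
        let s := (PySem.Str.split₀ multiword).foldl (fun s token =>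
          if brands.contains token && !(PySem.Str.isIn " " token)
          then PySem.Set.add s token else s) s
        (brands.filter (fun b => PySem.Str.isIn " " b)).foldl (fun s other =>
          if other == multiword then s
          else
            let other_tokens := PySem.Str.split₀ other
            if other_tokens.length ≥ multiword_tokens.length then s
            else if fragScanA multiword_tokens other_tokens
                 then PySem.Set.add s other else s) s)
        PySem.Set.empty
    ↔ dropCondA brands x := by
  rw [mem_foldl_iff _ (fun M x =>
    (∃ t ∈ PySem.Str.split₀ M,
        (brands.contains t && !(PySem.Str.isIn " " t)) = true ∧ x = t)
    ∨ (∃ O ∈ brands.filter (fun b => PySem.Str.isIn " " b),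
        ((O == M) = false
          ∧ ¬ (PySem.Str.split₀ O).length ≥ (PySem.Str.split₀ M).length
          ∧ fragScanA (PySem.Str.split₀ M) (PySem.Str.split₀ O) = true)
          ∧ x = O))]
  · simp [dropCondA, PySem.Set.empty]
  · intro s M y
    rw [mem_foldl_iff _ (fun O y =>
        ((O == M) = false
          ∧ ¬ (PySem.Str.split₀ O).length ≥ (PySem.Str.split₀ M).length
          ∧ fragScanA (PySem.Str.split₀ M) (PySem.Str.split₀ O) = true)
          ∧ y = O)]
    · rw [mem_foldl_iff _ (fun t y =>
          (brands.contains t && !(PySem.Str.isIn " " t)) = true ∧ y = t)]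
      · rw [or_assoc]
      · intro s t z; split_ifs with h
        · simp only [PySem.Set.mem_add]; tauto
        · tauto
    · intro s O z
      by_cases h1 : (O == M) = true
      · rw [if_pos h1]; simp [h1]
      · rw [if_neg h1]
        rw [Bool.not_eq_true] at h1
        by_cases h2 : (PySem.Str.split₀ O).length ≥ (PySem.Str.split₀ M).length
        · rw [if_pos h2]; tauto
        · rw [if_neg h2]
          by_cases h3 : fragScanA (PySem.Str.split₀ M) (PySem.Str.split₀ O) = true
          · rw [if_pos h3]; simp only [PySem.Set.mem_add]; tauto
          · rw [if_neg h3]; tauto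

-- B's paired fold splits into two independent folds
lemma pairFoldB (brands : List String) :
    brands.foldl
      (fun (p : PySem.Set String × PySem.Set (List String)) brand =>
        if PySem.Str.isIn " " brand then
          let toks := PySem.Str.split₀ brand
          let tokens := PySem.Set.update p.1 toks
          let n := toks.length
          let frags := (PySem.List.pyRange 0 (n : Int) 1).foldl (fun f length =>
            (PySem.List.pyRange 0 ((n : Int) - length + 1) 1).foldl (fun f i =>
              PySem.Set.add f (PySem.List.slice toks (some i) (some (i + length)))) f) p.2
          (tokens, frags)
        else p)
      (PySem.Set.empty, PySem.Set.empty)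
    = (brands.foldl (fun s brand =>
          if PySem.Str.isIn " " brand then PySem.Set.update s (PySem.Str.split₀ brand) else s)
          PySem.Set.empty,
       brands.foldl (fun f brand =>
          if PySem.Str.isIn " " brand then
            (PySem.List.pyRange 0 ((PySem.Str.split₀ brand).length : Int) 1).foldl (fun f length =>
              (PySem.List.pyRange 0 (((PySem.Str.split₀ brand).length : Int) - length + 1) 1).foldl (fun f i =>
                PySem.Set.add f (PySem.List.slice (PySem.Str.split₀ brand) (some i) (some (i + length)))) f) f
          else f)
          PySem.Set.empty) := by
  generalize (PySem.Set.empty : PySem.Set String) = s0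
  generalize (PySem.Set.empty : PySem.Set (List String)) = t0
  induction brands generalizing s0 t0 with
  | nil => rfl
  | cons hd tl ih =>
    simp only [List.foldl_cons]
    by_cases h : PySem.Str.isIn " " hd
    · simp only [h, if_true]; exact ih _ _
    · simp only [Bool.not_eq_true] at h; simp only [h, Bool.false_eq_true, if_false]; exact ih _ _

lemma memTokensB (brands : List String) (x : String) :
    x ∈ brands.foldl (fun s brand =>
          if PySem.Str.isIn " " brand then PySem.Set.update s (PySem.Str.split₀ brand) else s)
          PySem.Set.empty
    ↔ ∃ b ∈ brands, PySem.Str.isIn " " b = true ∧ x ∈ PySem.Str.split₀ b := by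
  rw [mem_foldl_iff _ (fun b x => PySem.Str.isIn " " b = true ∧ x ∈ PySem.Str.split₀ b)]
  · simp [PySem.Set.empty]
  · intro s b y
    by_cases h : PySem.Str.isIn " " b = true
    · rw [if_pos h]; simp only [PySem.Set.mem_update]; rw [and_iff_right h]
    · rw [if_neg h]; tauto

lemma memFragsB (brands : List String) (x : List String) :
    x ∈ brands.foldl (fun f brand =>
          if PySem.Str.isIn " " brand then
            (PySem.List.pyRange 0 (((PySem.Str.split₀ brand).length : Int)) 1).foldl (fun f length =>
              (PySem.List.pyRange 0 (((PySem.Str.split₀ brand).length : Int) - length + 1) 1).foldl (fun f i =>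
                PySem.Set.add f (PySem.List.slice (PySem.Str.split₀ brand) (some i) (some (i + length)))) f) f
          else f)
          PySem.Set.empty
    ↔ ∃ b ∈ brands, PySem.Str.isIn " " b = true ∧
        ∃ L : Int, (0 ≤ L ∧ L < ((PySem.Str.split₀ b).length : Int)) ∧
        ∃ i : Int, (0 ≤ i ∧ i < ((PySem.Str.split₀ b).length : Int) - L + 1) ∧
          x = PySem.List.slice (PySem.Str.split₀ b) (some i) (some (i + L)) := by
  rw [mem_foldl_iff _ (fun b x => PySem.Str.isIn " " b = true ∧
        ∃ L : Int, (0 ≤ L ∧ L < ((PySem.Str.split₀ b).length : Int)) ∧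
        ∃ i : Int, (0 ≤ i ∧ i < ((PySem.Str.split₀ b).length : Int) - L + 1) ∧
          x = PySem.List.slice (PySem.Str.split₀ b) (some i) (some (i + L)))]
  · simp [PySem.Set.empty]
  · intro f b y
    by_cases h : PySem.Str.isIn " " b = true
    · rw [if_pos h]
      rw [mem_foldl_iff _ (fun (L : Int) y =>
          ∃ i : Int, (0 ≤ i ∧ i < ((PySem.Str.split₀ b).length : Int) - L + 1) ∧
            y = PySem.List.slice (PySem.Str.split₀ b) (some i) (some (i + L)))]
      · rw [and_iff_right h]
        simp only [PySem.List.mem_pyRange_one]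
      · intro f L y
        rw [mem_foldl_iff _ (fun (i : Int) y =>
            y = PySem.List.slice (PySem.Str.split₀ b) (some i) (some (i + L)))]
        · simp only [PySem.List.mem_pyRange_one]
        · intro f i y; simp only [PySem.Set.mem_add]
    · rw [if_neg h]; tauto

lemma fragScanA_iff (mts ots : List String) :
    fragScanA mts ots = true ↔
      ∃ idx : Int, (0 ≤ idx ∧ idx < (mts.length : Int) - (ots.length : Int) + 1) ∧
        PySem.List.slice mts (some idx) (some (idx + (ots.length : Int))) = ots := by
  simp [fragScanA, List.any_eq_true, PySem.List.mem_pyRange_one]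

lemma length_slice_of_bounds (toks : List String) (i L : Int)
    (hi : 0 ≤ i) (hL : 0 ≤ L) (hb : i + L ≤ (toks.length : Int)) :
    (PySem.List.slice toks (some i) (some (i + L))).length = L.toNat := by
  rw [PySem.List.slice_toNat toks hi (by omega)]
  simp only [List.length_take, List.length_drop]
  omega

-- the two drop conditions agree on members of brands
lemma drop_iff (brands : List String) (x : String) (hx : x ∈ brands) :
    dropCondA brands x ↔
      ((PySem.Str.isIn " " x = false ∧
          ∃ b ∈ brands, PySem.Str.isIn " " b = true ∧ x ∈ PySem.Str.split₀ b)
       ∨ (PySem.Str.isIn " " x = true ∧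
          ∃ b ∈ brands, PySem.Str.isIn " " b = true ∧
            ∃ L : Int, (0 ≤ L ∧ L < ((PySem.Str.split₀ b).length : Int)) ∧
            ∃ i : Int, (0 ≤ i ∧ i < ((PySem.Str.split₀ b).length : Int) - L + 1) ∧
              PySem.Str.split₀ x = PySem.List.slice (PySem.Str.split₀ b) (some i) (some (i + L)))) := by
  constructor
  · rintro ⟨M, hMf, hcase⟩
    have hM := List.mem_filter.mp hMf
    rcases hcase with ⟨t, ht, hcond, hxt⟩ | ⟨O, hOf, ⟨hne, hlen, hscan⟩, hxO⟩
    · left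
      rw [Bool.and_eq_true, Bool.not_eq_true'] at hcond
      subst hxt
      exact ⟨hcond.2, M, hM.1, hM.2, ht⟩
    · right
      subst hxO
      have hO := List.mem_filter.mp hOf
      rw [fragScanA_iff] at hscan
      obtain ⟨idx, ⟨hidx0, hidxlt⟩, hslice⟩ := hscan
      rw [ge_iff_le, Nat.not_le] at hlen
      exact ⟨hO.2, M, hM.1, hM.2, ((PySem.Str.split₀ x).length : Int),
        ⟨Int.natCast_nonneg _, by exact_mod_cast hlen⟩,
        idx, ⟨hidx0, hidxlt⟩, hslice.symm⟩
  · rintro (⟨hxsp, M, hM, hMsp, hmem⟩ | ⟨hxsp, M, hM, hMsp, L, ⟨hL0, hLn⟩, i, ⟨hi0, hin⟩, hslice⟩)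
    · refine ⟨M, List.mem_filter.mpr ⟨hM, hMsp⟩, Or.inl ⟨x, hmem, ?_, rfl⟩⟩
      rw [Bool.and_eq_true, Bool.not_eq_true']
      exact ⟨List.contains_iff_mem.mpr hx, hxsp⟩
    · have hlenx : ((PySem.Str.split₀ x).length : Int) = L := by
        rw [hslice, length_slice_of_bounds _ _ _ hi0 hL0 (by omega)]
        omega
      have hxneM : (x == M) = false := by
        rw [beq_eq_false_iff_ne]
        intro h; rw [h] at hlenx; omega
      refine ⟨M, List.mem_filter.mpr ⟨hM, hMsp⟩,
        Or.inr ⟨x, List.mem_filter.mpr ⟨hx, hxsp⟩, ⟨hxneM, ?_, ?_⟩, rfl⟩⟩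
      · rw [ge_iff_le, Nat.not_le]; omega
      · rw [fragScanA_iff]
        exact ⟨i, ⟨hi0, by rw [hlenx]; omega⟩, by rw [hlenx]; exact hslice.symm⟩

-- ===== VERDICT (by name: the statement is the Claim_ definition above) =====
theorem collapse_component_brands_py_spec : Claim_equal_collapse_component_brands_py := by
  intro text brands _
  unfold Spec_collapse_component_brands_py
  unfold collapse_component_brands_py collapse_component_brands_py_alt
  simp only [pairFoldB]
  by_cases hmw : brands.filter (fun b => PySem.Str.isIn " " b) = []
  · -- no multiword brand: A returns brands, B filters nothing out
    rw [hmw]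
    simp only [List.isEmpty_nil, if_true]
    have hsp : ∀ b ∈ brands, PySem.Str.isIn " " b = false := by
      intro b hb
      cases h : PySem.Str.isIn " " b
      · rfl
      · exact absurd (hmw ▸ List.mem_filter.mpr ⟨hb, h⟩) (fun hh => List.not_mem_nil hh)
    have hsp' : ∀ b ∈ brands, PySem.Chars.isIn [' '] b.toList = false := by
      intro b hb; simpa using hsp b hb
    have h1 : brands.foldl (fun s brand =>
          if PySem.Str.isIn " " brand then PySem.Set.update s (PySem.Str.split₀ brand) else s)
          PySem.Set.empty = PySem.Set.empty := by
      apply foldl_id_of_mem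
      intro b hb a; simp [hsp' b hb]
    have h2 : brands.foldl (fun f brand =>
          if PySem.Str.isIn " " brand then
            (PySem.List.pyRange 0 (((PySem.Str.split₀ brand).length : Int)) 1).foldl (fun f length =>
              (PySem.List.pyRange 0 (((PySem.Str.split₀ brand).length : Int) - length + 1) 1).foldl (fun f i =>
                PySem.Set.add f (PySem.List.slice (PySem.Str.split₀ brand) (some i) (some (i + length)))) f) f
          else f)
          (PySem.Set.empty : PySem.Set (List String)) = PySem.Set.empty := by
      apply foldl_id_of_mem
      intro b hb a; simp [hsp' b hb]
    rw [h1, h2]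
    symm
    apply List.filter_eq_self.mpr
    intro b hb
    simp [PySem.Set.empty, PySem.Set.contains]
  · rw [if_neg (by simpa [List.isEmpty_iff] using hmw)]
    apply List.filter_congr
    intro x hx
    have hA := memA brands x
    have hT := memTokensB brands x
    have hF := memFragsB brands (PySem.Str.split₀ x)
    have hD := drop_iff brands x hx
    congr 1
    rw [Bool.eq_iff_iff]
    rw [PySem.Set.contains_iff, hA, hD]
    cases hsx : PySem.Str.isIn " " x
    · simp only [PySem.Set.contains_iff, hT, Bool.not_false, Bool.true_and,
        Bool.false_and, Bool.or_false, Bool.false_eq_true, false_and, or_false, true_and]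
    · simp only [PySem.Set.contains_iff, hF, Bool.not_true, Bool.false_and,
        Bool.true_and, Bool.false_or, Bool.true_eq_false, false_and, false_or, true_and]
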